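-- pv_equiv track=rewrite | github.com/defects4c/agent_apr | swe_agent/single_shot_thought/defects4j.py | _parse_test_log_for_traces
-- ===== SOURCE A (Python) =====
-- def _parse_test_log_for_traces(log: str) -> dict:
--     """Parse test output for error messages and stack traces."""
--     fail_info = {}
--     lines = log.splitlines()
--     for i, line in enumerate(lines):
--         if line.strip().startswith("- ") and "::" in line:
--             tc_name = line.strip()[2:].strip()
--             tc_sig = tc_name.replace("::", ".") + "()"
--             error_msg = ""
--             stack = ""
--             for j in range(i + 1, min(i + 30, len(lines))):
--                 if lines[j].strip().startswith("- "):
--                     break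
--                 if lines[j].startswith("\tat") or lines[j].startswith("  at "):
--                     stack += lines[j] + "\n"
--                 elif lines[j].strip():
--                     error_msg += lines[j] + "\n"
--             fail_info[tc_sig] = {"error_message": error_msg, "stack_trace": stack}
--     return fail_info
-- ===== SOURCE B (Python) =====
-- def _parse_test_log_for_traces(log: str) -> dict:
--     """Parse test output for error messages and stack traces.
--     B: one forward pass with a small state machine -- the current testcase
--     signature (or None) with its two accumulators and a window counter --
--     instead of re-scanning a lookahead window for every header line."""
--     fail_info = {}
--     cur = None
--     err = stk = ""
--     cnt = 0
--     for line in log.splitlines():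
--         s = line.strip()
--         if s.startswith("- "):
--             if cur is not None:
--                 fail_info[cur] = {"error_message": err, "stack_trace": stk}
--             if "::" in line:
--                 cur = s[2:].strip().replace("::", ".") + "()"
--                 err = stk = ""
--                 cnt = 0
--             else:
--                 cur = None
--         elif cur is not None and cnt < 29:
--             if line.startswith("\tat") or line.startswith("  at "):
--                 stk += line + "\n"
--             elif s:
--                 err += line + "\n"
--             cnt += 1
--     if cur is not None:
--         fail_info[cur] = {"error_message": err, "stack_trace": stk}
--     return fail_info
-- ===== Notes on version B (the rewrite author's own statement) =====
-- stated objective: alternative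
-- what changed: A scans for header lines and, for each one, re-reads the following up-to-29 lines with a nested index loop; B makes one forward pass with a state machine (current testcase signature or None, two accumulators, a window counter), writing each entry when the block closes or at end of input, so no line is ever read twice.
import Mathlib
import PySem

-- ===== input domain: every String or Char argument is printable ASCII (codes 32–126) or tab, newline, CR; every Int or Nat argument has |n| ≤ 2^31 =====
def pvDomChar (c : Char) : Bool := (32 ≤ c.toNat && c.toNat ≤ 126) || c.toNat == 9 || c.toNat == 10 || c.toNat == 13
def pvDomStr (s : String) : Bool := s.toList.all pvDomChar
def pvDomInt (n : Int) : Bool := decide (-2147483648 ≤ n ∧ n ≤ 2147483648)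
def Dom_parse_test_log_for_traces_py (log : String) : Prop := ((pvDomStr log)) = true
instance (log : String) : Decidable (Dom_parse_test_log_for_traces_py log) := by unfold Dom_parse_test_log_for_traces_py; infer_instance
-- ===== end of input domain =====

-- B replaces A's per-header 29-line lookahead loop by a single forward pass with a
-- state machine (active signature, two accumulators, window counter); same results
-- (objective: alternative decomposition, each line read once).

-- ===== PORT A =====
-- A's inner 'for j in range(i+1, min(i+30, len(lines)))' loop with its break,
-- as a recursion over the index list; lines[j] is ported as pyGetD with default ""
-- (every index produced by the range is in bounds, so the default is never used).
def pvInnerA (lines : List String) : List Int → String → String → String × String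
  | [], err, stk => (err, stk)
  | j :: rest, err, stk =>
    let lj := PySem.List.pyGetD lines j ""
    if PySem.Str.startswith (PySem.Str.strip lj) "- " then (err, stk)
    else if PySem.Str.startswith lj "\tat" || PySem.Str.startswith lj "  at " then
      pvInnerA lines rest err (stk ++ lj ++ "\n")
    else if !(PySem.Str.strip lj == "") then
      pvInnerA lines rest (err ++ lj ++ "\n") stk
    else
      pvInnerA lines rest err stk

def parse_test_log_for_traces_py (log : String) : List (String × List (String × String)) :=
  let lines := PySem.Str.splitlines log
  (((PySem.List.enumerate lines).foldl (fun fail_info (p : Int × String) =>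
      if PySem.Str.startswith (PySem.Str.strip p.2) "- " && PySem.Str.isIn "::" p.2 then
        let tc_name := PySem.Str.strip (PySem.Str.slice (PySem.Str.strip p.2) (some 2) none)
        let tc_sig := PySem.Str.replace tc_name "::" "." ++ "()"
        let es := pvInnerA lines
          (PySem.List.pyRange (p.1 + 1) (min (p.1 + 30) (lines.length : Int)) 1) "" ""
        PySem.Dict.insert fail_info tc_sig [("error_message", es.1), ("stack_trace", es.2)]
      else fail_info)
    PySem.Dict.empty) : PySem.Dict String (List (String × String))).items

-- ===== PORT B =====
-- B's state: (fail_info, cur) where cur = some (sig, err, stk, cnt) iff a testcase is active.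
def pvStepB (st : PySem.Dict String (List (String × String)) × Option (String × String × String × Nat))
    (line : String) :
    PySem.Dict String (List (String × String)) × Option (String × String × String × Nat) :=
  let s := PySem.Str.strip line
  if PySem.Str.startswith s "- " then
    let d := match st.2 with
      | some (sig, err, stk, _) =>
          PySem.Dict.insert st.1 sig [("error_message", err), ("stack_trace", stk)]
      | none => st.1
    if PySem.Str.isIn "::" line then
      (d, some (PySem.Str.replace (PySem.Str.strip (PySem.Str.slice s (some 2) none)) "::" "." ++ "()",
                "", "", 0))
    else (d, none)
  else
    match st.2 with
    | some (sig, err, stk, cnt) =>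
      if cnt < 29 then
        if PySem.Str.startswith line "\tat" || PySem.Str.startswith line "  at " then
          (st.1, some (sig, err, stk ++ line ++ "\n", cnt + 1))
        else if !(s == "") then
          (st.1, some (sig, err ++ line ++ "\n", stk, cnt + 1))
        else
          (st.1, some (sig, err, stk, cnt + 1))
      else st
    | none => st

-- the final flush ('if cur is not None' after the loop)
def pvFlushB (st : PySem.Dict String (List (String × String)) × Option (String × String × String × Nat)) :
    PySem.Dict String (List (String × String)) :=
  match st.2 with
  | some (sig, err, stk, _) =>
      PySem.Dict.insert st.1 sig [("error_message", err), ("stack_trace", stk)]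
  | none => st.1

def parse_test_log_for_traces_py_alt (log : String) : List (String × List (String × String)) :=
  (pvFlushB ((PySem.Str.splitlines log).foldl pvStepB (PySem.Dict.empty, none))).items

-- ===== PRECONDITION & SPEC =====
def Spec_parse_test_log_for_traces_py (log : String) (out : List (String × List (String × String))) : Prop := out = parse_test_log_for_traces_py_alt log
instance (log : String) (out : List (String × List (String × String))) : Decidable (Spec_parse_test_log_for_traces_py log out) := by unfold Spec_parse_test_log_for_traces_py; infer_instance

-- ===== CLAIM (what is proved, stated in full; the proofs are below) =====
def Claim_equal_parse_test_log_for_traces_py : Prop := ∀ (log : String), Dom_parse_test_log_for_traces_py log → Spec_parse_test_log_for_traces_py log (parse_test_log_for_traces_py log)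

-- ===== LEMMAS AND PROOFS =====

-- atomic predicates
def pvBreak (x : String) : Bool := PySem.Str.startswith (PySem.Str.strip x) "- "
def pvIsAt (x : String) : Bool :=
  PySem.Str.startswith x "\tat" || PySem.Str.startswith x "  at "
def pvNonBlank (x : String) : Bool := !(PySem.Str.strip x == "")
def pvHeaderQ (x : String) : Bool := pvBreak x && PySem.Str.isIn "::" x
def pvSig (x : String) : String :=
  PySem.Str.replace (PySem.Str.strip (PySem.Str.slice (PySem.Str.strip x) (some 2) none)) "::" "." ++ "()"

-- A's inner loop on the list of lines it actually visits
def pvInnerList : List String → String → String → String × String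
  | [], err, stk => (err, stk)
  | x :: rest, err, stk =>
    if pvBreak x then (err, stk)
    else if pvIsAt x then pvInnerList rest err (stk ++ x ++ "\n")
    else if pvNonBlank x then pvInnerList rest (err ++ x ++ "\n") stk
    else pvInnerList rest err stk

def pvEntry (block : List String) (e s : String) : List (String × String) :=
  [("error_message", (pvInnerList block e s).1), ("stack_trace", (pvInnerList block e s).2)]

-- common intermediate: A's algorithm as a structural recursion on the line list
def pvArec : List String → PySem.Dict String (List (String × String)) →
    PySem.Dict String (List (String × String))
  | [], d => d
  | x :: rest, d =>
    if pvHeaderQ x then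
      pvArec rest (PySem.Dict.insert d (pvSig x) (pvEntry (rest.take 29) "" ""))
    else pvArec rest d

theorem pvInnerA_eq_list (lines : List String) (js : List Int) (e s : String) :
    pvInnerA lines js e s = pvInnerList (js.map (fun j => PySem.List.pyGetD lines j "")) e s := by
  induction js generalizing e s with
  | nil => rfl
  | cons j rest ih =>
    simp only [pvInnerA, pvInnerList, pvBreak, pvIsAt, pvNonBlank, List.map_cons]
    split_ifs <;> simp [ih]

-- the indices A's range visits fetch exactly the window of following lines
theorem pv_range_map_getD (lines : List String) (a c : Nat) :
    (PySem.List.pyRange (a : Int) (min ((a + c : Nat) : Int) ((lines.length : Nat) : Int)) 1).map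
        (fun j => PySem.List.pyGetD lines j "")
      = (lines.drop a).take c := by
  induction c generalizing a with
  | zero =>
    rw [PySem.List.pyRange_one_eq_nil (by omega : min ((a + 0 : Nat) : Int) ((lines.length : Nat) : Int) ≤ (a : Nat))]
    simp
  | succ c ih =>
    by_cases h : a < lines.length
    · rw [PySem.List.pyRange_one_cons (by push_cast; omega)]
      have hget : PySem.List.pyGetD lines (a : Int) "" = lines[a] := by
        rw [PySem.List.pyGetD_natCast]; simp [List.getD, h]
      have hdrop : lines.drop a = lines[a] :: lines.drop (a + 1) :=
        List.drop_eq_getElem_cons h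
      have harith : ((a : Nat) : Int) + 1 = ((a + 1 : Nat) : Int) := by push_cast; ring
      have harith2 : ((a + (c + 1) : Nat) : Int) = (((a + 1) + c : Nat) : Int) := by push_cast; ring
      rw [List.map_cons, hget, hdrop, List.take_succ_cons, harith, harith2, ih (a + 1)]
    · rw [PySem.List.pyRange_one_eq_nil (by push_cast; omega)]
      rw [List.drop_eq_nil_of_le (by omega)]
      simp

-- A's enumerate-fold equals the structural recursion pvArec
theorem pvA_fold (lines : List String) :
    ∀ (l : List String) (n : Nat), l = lines.drop n →
    ∀ (d : PySem.Dict String (List (String × String))),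
    (PySem.List.enumerate l ((n : Nat) : Int)).foldl
      (fun fail_info (p : Int × String) =>
        if PySem.Str.startswith (PySem.Str.strip p.2) "- " && PySem.Str.isIn "::" p.2 then
          let tc_name := PySem.Str.strip (PySem.Str.slice (PySem.Str.strip p.2) (some 2) none)
          let tc_sig := PySem.Str.replace tc_name "::" "." ++ "()"
          let es := pvInnerA lines
            (PySem.List.pyRange (p.1 + 1) (min (p.1 + 30) (lines.length : Int)) 1) "" ""
          PySem.Dict.insert fail_info tc_sig [("error_message", es.1), ("stack_trace", es.2)]
        else fail_info) d
      = pvArec l d := by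
  intro l
  induction l with
  | nil => intro n _ d; simp [PySem.List.enumerate_nil, pvArec]
  | cons x rest ih =>
    intro n hl d
    have hrest : rest = lines.drop (n + 1) := by
      have h1 : (lines.drop n).drop 1 = lines.drop (n + 1) := by
        rw [List.drop_drop]
      rw [← hl] at h1
      simpa using h1
    have hwin : pvInnerA lines
        (PySem.List.pyRange (((n : Nat) : Int) + 1) (min (((n : Nat) : Int) + 30) (lines.length : Int)) 1) "" ""
        = pvInnerList (rest.take 29) "" "" := by
      rw [pvInnerA_eq_list]
      congr 1
      have e1 : ((n : Nat) : Int) + 1 = ((n + 1 : Nat) : Int) := by push_cast; ring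
      have e2 : ((n : Nat) : Int) + 30 = (((n + 1) + 29 : Nat) : Int) := by push_cast; ring
      rw [e1, e2, pv_range_map_getD lines (n + 1) 29, ← hrest]
    have hcast : ((n : Nat) : Int) + 1 = ((n + 1 : Nat) : Int) := by push_cast; ring
    rw [PySem.List.enumerate_cons, List.foldl_cons, hcast, ih (n + 1) hrest]
    by_cases hb : PySem.Chars.startswith (PySem.Chars.strip x.toList) ['-', ' '] = true
    · by_cases hc : PySem.Chars.isIn [':', ':'] x.toList = true
      · simp [pvArec, pvHeaderQ, pvBreak, pvSig, pvEntry, hb, hc, hwin]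
      · simp [pvArec, pvHeaderQ, pvBreak, hb, hc]
    · simp [pvArec, pvHeaderQ, pvBreak, hb]

-- the active entry is finished once x breaks or the window is exhausted
theorem pvEntry_closed (x : String) (rest : List String) (e s : String) (c : Nat)
    (h : pvBreak x = true ∨ 29 - c = 0) :
    pvEntry ((x :: rest).take (29 - c)) e s = [("error_message", e), ("stack_trace", s)] := by
  rcases Nat.eq_zero_or_pos (29 - c) with h0 | hpos
  · simp [h0, pvEntry, pvInnerList]
  · rcases h with hb | h0
    · obtain ⟨m, hm⟩ : ∃ m, 29 - c = m + 1 := ⟨29 - c - 1, by omega⟩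
      simp [hm, pvEntry, pvInnerList, hb]
    · omega

-- B's fold with the invariant relating the active state to pvArec
theorem pvB_fold (l : List String) :
    (∀ d, pvFlushB (l.foldl pvStepB (d, none)) = pvArec l d) ∧
    (∀ d sig e s (c : Nat), c ≤ 29 →
      pvFlushB (l.foldl pvStepB (d, some (sig, e, s, c)))
        = pvArec l (PySem.Dict.insert d sig (pvEntry (l.take (29 - c)) e s))) := by
  induction l with
  | nil =>
    constructor
    · intro d; simp [pvFlushB, pvArec]
    · intro d sig e s c _; simp [pvFlushB, pvArec, pvEntry, pvInnerList]
  | cons x rest ih =>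
    constructor
    · intro d
      rw [List.foldl_cons]
      by_cases hb : PySem.Chars.startswith (PySem.Chars.strip x.toList) ['-', ' '] = true
      · by_cases hc : PySem.Chars.isIn [':', ':'] x.toList = true
        · have hstep : pvStepB (d, none) x = (d, some (pvSig x, "", "", 0)) := by
            simp [pvStepB, pvSig, hb, hc]
          rw [hstep, ih.2 d (pvSig x) "" "" 0 (by omega)]
          simp [pvArec, pvHeaderQ, pvBreak, hb, hc]
        · have hstep : pvStepB (d, none) x = (d, none) := by simp [pvStepB, hb, hc]
          rw [hstep, ih.1 d]
          simp [pvArec, pvHeaderQ, pvBreak, hb, hc]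
      · have hstep : pvStepB (d, none) x = (d, none) := by simp [pvStepB, hb]
        rw [hstep, ih.1 d]
        simp [pvArec, pvHeaderQ, pvBreak, hb]
    · intro d sig e s c hc29
      rw [List.foldl_cons]
      by_cases hb : PySem.Chars.startswith (PySem.Chars.strip x.toList) ['-', ' '] = true
      · have hclosed := pvEntry_closed x rest e s c (Or.inl (by simp [pvBreak, hb]))
        by_cases hc : PySem.Chars.isIn [':', ':'] x.toList = true
        · have hstep : pvStepB (d, some (sig, e, s, c)) x
              = (PySem.Dict.insert d sig [("error_message", e), ("stack_trace", s)],
                 some (pvSig x, "", "", 0)) := by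
            simp [pvStepB, pvSig, hb, hc]
          rw [hstep, ih.2 _ (pvSig x) "" "" 0 (by omega), hclosed]
          simp [pvArec, pvHeaderQ, pvBreak, hb, hc]
        · have hstep : pvStepB (d, some (sig, e, s, c)) x
              = (PySem.Dict.insert d sig [("error_message", e), ("stack_trace", s)], none) := by
            simp [pvStepB, hb, hc]
          rw [hstep, ih.1, hclosed]
          simp [pvArec, pvHeaderQ, pvBreak, hb, hc]
      · by_cases hlt : c < 29
        · have hxtake : (x :: rest).take (29 - c) = x :: rest.take (29 - (c + 1)) := by
            have htake : (29 - c) = (29 - (c + 1)) + 1 := by omega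
            rw [htake, List.take_succ_cons]
          by_cases ha1 : PySem.Chars.startswith x.toList ['\t', 'a', 't'] = true
          · have hstep : pvStepB (d, some (sig, e, s, c)) x
                = (d, some (sig, e, s ++ x ++ "\n", c + 1)) := by
              simp [pvStepB, hb, hlt, ha1]
            rw [hstep, ih.2 d sig e (s ++ x ++ "\n") (c + 1) (by omega)]
            have heq : pvEntry ((x :: rest).take (29 - c)) e s
                = pvEntry (rest.take (29 - (c + 1))) e (s ++ x ++ "\n") := by
              simp [hxtake, pvEntry, pvInnerList, pvBreak, pvIsAt, hb, ha1]
            rw [heq]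
            simp [pvArec, pvHeaderQ, pvBreak, hb]
          · by_cases ha2 : PySem.Chars.startswith x.toList [' ', ' ', 'a', 't', ' '] = true
            · have hstep : pvStepB (d, some (sig, e, s, c)) x
                  = (d, some (sig, e, s ++ x ++ "\n", c + 1)) := by
                simp [pvStepB, hb, hlt, ha1, ha2]
              rw [hstep, ih.2 d sig e (s ++ x ++ "\n") (c + 1) (by omega)]
              have heq : pvEntry ((x :: rest).take (29 - c)) e s
                  = pvEntry (rest.take (29 - (c + 1))) e (s ++ x ++ "\n") := by
                simp [hxtake, pvEntry, pvInnerList, pvBreak, pvIsAt, hb, ha1, ha2]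
              rw [heq]
              simp [pvArec, pvHeaderQ, pvBreak, hb]
            · by_cases hn : PySem.Str.strip x = ""
              · have hstep : pvStepB (d, some (sig, e, s, c)) x
                    = (d, some (sig, e, s, c + 1)) := by
                  simp [pvStepB, hb, hlt, ha1, ha2, hn,
                    (by decide : PySem.Chars.startswith [] ['-', ' '] = false)]
                rw [hstep, ih.2 d sig e s (c + 1) (by omega)]
                have heq : pvEntry ((x :: rest).take (29 - c)) e s
                    = pvEntry (rest.take (29 - (c + 1))) e s := by
                  simp [hxtake, pvEntry, pvInnerList, pvBreak, pvIsAt, pvNonBlank, hb, ha1, ha2, hn,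
                    (by decide : PySem.Chars.startswith [] ['-', ' '] = false)]
                rw [heq]
                simp [pvArec, pvHeaderQ, pvBreak, hb]
              · have hstep : pvStepB (d, some (sig, e, s, c)) x
                    = (d, some (sig, e ++ x ++ "\n", s, c + 1)) := by
                  simp [pvStepB, hb, hlt, ha1, ha2, hn]
                rw [hstep, ih.2 d sig (e ++ x ++ "\n") s (c + 1) (by omega)]
                have heq : pvEntry ((x :: rest).take (29 - c)) e s
                    = pvEntry (rest.take (29 - (c + 1))) (e ++ x ++ "\n") s := by
                  simp [hxtake, pvEntry, pvInnerList, pvBreak, pvIsAt, pvNonBlank, hb, ha1, ha2, hn]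
                rw [heq]
                simp [pvArec, pvHeaderQ, pvBreak, hb]
        · have hstep : pvStepB (d, some (sig, e, s, c)) x = (d, some (sig, e, s, c)) := by
            simp [pvStepB, hb, hlt]
          rw [hstep, ih.2 d sig e s c hc29]
          have h0 : 29 - c = 0 := by omega
          simp [pvArec, pvHeaderQ, pvBreak, hb, h0, pvEntry, pvInnerList]

-- ===== VERDICT (by name: the statement is the Claim_ definition above) =====
theorem parse_test_log_for_traces_py_spec : Claim_equal_parse_test_log_for_traces_py := by
  intro log _
  unfold Spec_parse_test_log_for_traces_py
  unfold parse_test_log_for_traces_py parse_test_log_for_traces_py_alt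
  apply congrArg PySem.Dict.items
  rw [(pvB_fold (PySem.Str.splitlines log)).1]
  have h := pvA_fold (PySem.Str.splitlines log) (PySem.Str.splitlines log) 0 (by simp)
    PySem.Dict.empty
  simpa using h
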